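-- pv_equiv track=rewrite | github.com/SRWS-PSG/search-formula-developper | scripts/conversion/clinicaltrials/converter.py | _split_or_terms
-- ===== SOURCE A (Python) =====
-- from typing import List, Dict, Tuple
--
-- def _split_or_terms(line: str) -> List[str]:
--     """トップレベルのOR演算子で用語を分割する。括弧内のORは分割しない。"""
--     terms = []
--     depth = 0
--     current = []
--     i = 0
--     while i < len(line):
--         ch = line[i]
--         if ch == '(':
--             depth += 1
--             current.append(ch)
--         elif ch == ')':
--             depth -= 1
--             current.append(ch)
--         elif depth == 0 and line[i:i+4].upper() == ' OR ' and i > 0: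
--             terms.append(''.join(current).strip())
--             current = []
--             i += 4
--             continue
--         else:
--             current.append(ch)
--         i += 1
--     if current:
--         terms.append(''.join(current).strip())
--     return terms
-- ===== SOURCE B (Python) =====
-- def _split_or_terms(line):
--     """Two-phase: collect all depth-0 ' OR ' match positions, greedily pick
--     non-overlapping cuts, then slice the line at those cuts and strip."""
--     n = len(line)
--     u = line.upper()
--     cand = [i for i in range(1, n) if u[i:i+4] == ' OR ' and _bal(line, i) == 0]
--     cuts = []
--     for i in cand:
--         if not cuts or i >= cuts[-1] + 4:
--             cuts.append(i)
--     starts = [0] + [c + 4 for c in cuts]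
--     ends = cuts + [n]
--     pieces = [line[s:e].strip() for s, e in zip(starts, ends)]
--     if starts[-1] == n:
--         pieces.pop()
--     return pieces
--
--
-- def _bal(line, i):
--     p = line[:i]
--     return p.count('(') - p.count(')')
-- ===== Notes on version B (the rewrite author's own statement) =====
-- stated objective: alternative
-- what changed: Replaces A's single-pass character state machine (incremental depth counter plus a growing character buffer flushed at each separator) with a two-phase plan: first collect all positions where a depth-0 case-insensitive ' OR ' occurs (depth recomputed from prefix paren counts), greedily keep non-overlapping ones, then slice the original string at those cut positions and strip each slice.
import Mathlib
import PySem

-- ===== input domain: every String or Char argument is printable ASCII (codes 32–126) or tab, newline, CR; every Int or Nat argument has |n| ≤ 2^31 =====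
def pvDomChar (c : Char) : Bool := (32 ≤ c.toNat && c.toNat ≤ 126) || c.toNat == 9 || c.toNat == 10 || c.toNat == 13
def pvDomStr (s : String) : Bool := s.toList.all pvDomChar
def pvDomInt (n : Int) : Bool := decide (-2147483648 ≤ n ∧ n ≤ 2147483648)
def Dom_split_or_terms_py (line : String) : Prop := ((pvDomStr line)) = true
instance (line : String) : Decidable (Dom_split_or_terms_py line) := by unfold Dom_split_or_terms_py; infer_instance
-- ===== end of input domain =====

-- B replaces A's one-pass state machine (depth counter + flushed character buffer) by a
-- two-phase plan: collect depth-0 ' OR ' match positions, pick non-overlapping cuts greedily,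
-- then slice the line at the cuts and strip each slice ("alternative": different algorithm, not faster).

-- ===== PORT A =====
-- the while loop of A: state (i, depth, current, terms)
def pvALoop (cs : List Char) (i : Nat) (depth : Int) (current : List Char) (terms : List String) : List String :=
  if h : i < cs.length then
    let ch := cs[i]
    if ch = '(' then
      pvALoop cs (i + 1) (depth + 1) (current ++ [ch]) terms
    else if ch = ')' then
      pvALoop cs (i + 1) (depth - 1) (current ++ [ch]) terms
    else if depth = 0 ∧ PySem.Chars.upper ((cs.drop i).take 4) = " OR ".toList ∧ 0 < i then
      pvALoop cs (i + 4) depth [] (terms ++ [String.mk (PySem.Chars.strip current)])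
    else
      pvALoop cs (i + 1) depth (current ++ [ch]) terms
  else
    if current ≠ [] then terms ++ [String.mk (PySem.Chars.strip current)] else terms
termination_by cs.length - i
decreasing_by
  · exact Nat.sub_lt_sub_left h (Nat.lt_succ_self i)
  · exact Nat.sub_lt_sub_left h (Nat.lt_succ_self i)
  · exact Nat.sub_lt_sub_left h (Nat.lt_add_of_pos_right (by decide))
  · exact Nat.sub_lt_sub_left h (Nat.lt_succ_self i)

def split_or_terms_py (line : String) : List String := pvALoop line.toList 0 0 [] []

-- ===== PORT B =====
-- helper _bal(line, i): paren balance of line[:i]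
def pvBal (cs : List Char) (i : Nat) : Int :=
  (((cs.take i).count '(' : Int)) - (((cs.take i).count ')' : Int))

-- body of B's greedy for-loop over the candidate positions
def pvBStep (cuts : List Nat) (i : Nat) : List Nat :=
  match cuts.getLast? with
  | none => cuts ++ [i]
  | some l => if l + 4 ≤ i then cuts ++ [i] else cuts

def split_or_terms_py_alt (line : String) : List String :=
  let cs := line.toList
  let n := cs.length
  let us := PySem.Chars.upper cs
  let cand := (List.range' 1 (n - 1)).filter (fun i => ((us.drop i).take 4 == " OR ".toList) && (pvBal cs i == 0))
  let cuts := cand.foldl pvBStep []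
  let starts := 0 :: cuts.map (· + 4)
  let ends := cuts ++ [n]
  let pieces := (starts.zip ends).map (fun se => String.mk (PySem.Chars.strip ((cs.take se.2).drop se.1)))
  if starts.getLast? = some n then pieces.dropLast else pieces

-- ===== PRECONDITION & SPEC =====
def Spec_split_or_terms_py (line : String) (out : List String) : Prop := out = split_or_terms_py_alt line
instance (line : String) (out : List String) : Decidable (Spec_split_or_terms_py line out) := by unfold Spec_split_or_terms_py; infer_instance

-- ===== CLAIM (what is proved, stated in full; the proofs are below) =====
def Claim_equal_split_or_terms_py : Prop := ∀ (line : String), Dom_split_or_terms_py line → Spec_split_or_terms_py line (split_or_terms_py line)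

-- ===== LEMMAS AND PROOFS =====

-- the accepted-cut test at position i (B's candidate test plus i > 0)
def pvOk (cs : List Char) (i : Nat) : Bool :=
  (((PySem.Chars.upper cs).drop i).take 4 == " OR ".toList) && (pvBal cs i == 0) && decide (0 < i)

-- the greedy cut positions from index i on, scanned as A scans them
def pvG (cs : List Char) (i : Nat) : List Nat :=
  if i < cs.length then
    if pvOk cs i then i :: pvG cs (i + 4) else pvG cs (i + 1)
  else []
termination_by cs.length - i
decreasing_by
  · exact Nat.sub_lt_sub_left (by omega) (Nat.lt_add_of_pos_right (by decide))
  · exact Nat.sub_lt_sub_left (by omega) (Nat.lt_succ_self i)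

-- B's greedy selection, with explicit cursor
def pvPick (c : Nat) : List Nat → List Nat
  | [] => []
  | x :: xs => if c ≤ x then x :: pvPick (x + 4) xs else pvPick c xs

-- the cursor after the cuts picked so far
def pvCursor (acc : List Nat) : Nat :=
  match acc.getLast? with
  | none => 0
  | some v => v + 4

-- all candidate positions from index i on
def pvF (cs : List Char) (i : Nat) : List Nat :=
  (List.range' i (cs.length - i)).filter (fun k => pvOk cs k)

def pvStrip (l : List Char) : String := String.mk (PySem.Chars.strip l)

-- the stripped pieces cut at the given positions, current segment starting at s
def pvPieces (cs : List Char) (s : Nat) : List Nat → List String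
  | [] => if cs.drop s ≠ [] then [pvStrip (cs.drop s)] else []
  | k :: ks => pvStrip ((cs.take k).drop s) :: pvPieces cs (k + 4) ks

theorem pv_pieces_nil (cs : List Char) (s : Nat) :
    pvPieces cs s [] = if cs.drop s ≠ [] then [pvStrip (cs.drop s)] else [] := rfl

theorem pv_pieces_cons (cs : List Char) (s k : Nat) (ks : List Nat) :
    pvPieces cs s (k :: ks) = pvStrip ((cs.take k).drop s) :: pvPieces cs (k + 4) ks := rfl

theorem pv_pick_cons (c x : Nat) (xs : List Nat) :
    pvPick c (x :: xs) = if c ≤ x then x :: pvPick (x + 4) xs else pvPick c xs := rfl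

theorem pv_upper_slice (cs : List Char) (i : Nat) :
    PySem.Chars.upper ((cs.drop i).take 4) = ((PySem.Chars.upper cs).drop i).take 4 := by
  simp [PySem.Chars.upper, List.map_take, List.map_drop]

theorem pv_ok_iff (cs : List Char) (i : Nat) :
    pvOk cs i = true ↔
      (((PySem.Chars.upper cs).drop i).take 4 = " OR ".toList ∧ pvBal cs i = 0 ∧ 0 < i) := by
  unfold pvOk
  simp only [Bool.and_eq_true, beq_iff_eq, decide_eq_true_eq, and_assoc]

theorem pv_match_len {cs : List Char} {i : Nat}
    (h : ((PySem.Chars.upper cs).drop i).take 4 = " OR ".toList) : i + 4 ≤ cs.length := by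
  have hl := congrArg List.length h
  simp [PySem.Chars.upper] at hl
  omega

theorem pv_match_noparen {cs : List Char} {i : Nat}
    (h : ((PySem.Chars.upper cs).drop i).take 4 = " OR ".toList) :
    ((cs.drop i).take 4).count '(' = 0 ∧ ((cs.drop i).take 4).count ')' = 0 := by
  have hm : ((cs.drop i).take 4).map PySem.Chars.upperChar = " OR ".toList := by
    rw [← pv_upper_slice] at h
    exact h
  constructor <;>
  · rw [List.count_eq_zero]
    intro hmem
    have h2 := List.mem_map_of_mem (f := PySem.Chars.upperChar) hmem
    rw [hm] at h2
    exact absurd h2 (by decide)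

theorem pv_bal_skip {cs : List Char} {i : Nat}
    (h : ((PySem.Chars.upper cs).drop i).take 4 = " OR ".toList) :
    pvBal cs (i + 4) = pvBal cs i := by
  have hp := pv_match_noparen h
  unfold pvBal
  rw [List.take_add]
  simp [List.count_append, hp.1, hp.2]

theorem pv_take_succ_get {cs : List Char} {i : Nat} (h : i < cs.length) :
    cs.take (i + 1) = cs.take i ++ [cs[i]] := by
  rw [List.take_succ, List.getElem?_eq_getElem h]
  rfl

theorem pv_bal_succ {cs : List Char} {i : Nat} (h : i < cs.length) :
    pvBal cs (i + 1) = pvBal cs i + (if cs[i] = '(' then 1 else if cs[i] = ')' then -1 else 0) := by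
  unfold pvBal
  rw [pv_take_succ_get h]
  simp only [List.count_append]
  split_ifs with h1 h2 <;> simp_all <;> omega

theorem pv_not_match_of_paren {cs : List Char} {i : Nat} (h : i < cs.length)
    (hp : cs[i] = '(' ∨ cs[i] = ')') :
    ¬ (((PySem.Chars.upper cs).drop i).take 4 = " OR ".toList) := by
  intro hm
  have hm' : ((cs.drop i).take 4).map PySem.Chars.upperChar = " OR ".toList := by
    rw [← pv_upper_slice] at hm
    exact hm
  rw [List.drop_eq_getElem_cons h] at hm'
  rw [List.take_succ_cons, List.map_cons] at hm'
  have hh : PySem.Chars.upperChar cs[i] = ' ' := by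
    have := List.head_eq_of_cons_eq hm'
    simpa using this
  rcases hp with hp | hp <;> rw [hp] at hh <;> exact absurd hh (by decide)

theorem pv_slice_snoc {cs : List Char} {i s : Nat} (h : i < cs.length) (hs : s ≤ i) :
    (cs.take i).drop s ++ [cs[i]] = (cs.take (i + 1)).drop s := by
  rw [pv_take_succ_get h, List.drop_append_of_le_length]
  simp
  omega

theorem pv_aloop_base {cs : List Char} {i : Nat} (h : cs.length ≤ i) (d : Int) (s : Nat)
    (terms : List String) :
    pvALoop cs i d ((cs.take i).drop s) terms = terms ++ pvPieces cs s (pvG cs i) := by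
  have hnlt : ¬ i < cs.length := by omega
  rw [pvALoop, pvG, dif_neg hnlt, if_neg hnlt, List.take_of_length_le h, pv_pieces_nil]
  split_ifs with hne
  · simp [pvStrip]
  · simp

theorem pv_aloop_eq (cs : List Char) :
    ∀ (fuel i s : Nat) (terms : List String), cs.length - i ≤ fuel → s ≤ i → i ≤ cs.length →
    pvALoop cs i (pvBal cs i) ((cs.take i).drop s) terms = terms ++ pvPieces cs s (pvG cs i) := by
  intro fuel
  induction fuel with
  | zero =>
    intro i s terms hf hs hn
    exact pv_aloop_base (by omega) _ s terms
  | succ fuel ih =>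
    intro i s terms hf hs hn
    by_cases hlt : i < cs.length
    · rw [pvALoop, pvG, dif_pos hlt, if_pos hlt]
      by_cases hp1 : cs[i] = '('
      · have hnm := pv_not_match_of_paren hlt (Or.inl hp1)
        have hok : ¬ pvOk cs i = true := by
          rw [pv_ok_iff]
          rintro ⟨hm, -, -⟩
          exact hnm hm
        rw [if_pos hp1, if_neg hok]
        have hb : pvBal cs i + 1 = pvBal cs (i + 1) := by
          rw [pv_bal_succ hlt, if_pos hp1]
        rw [hb, pv_slice_snoc hlt hs]
        exact ih (i + 1) s terms (by omega) (by omega) (by omega)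
      · by_cases hp2 : cs[i] = ')'
        · have hnm := pv_not_match_of_paren hlt (Or.inr hp2)
          have hok : ¬ pvOk cs i = true := by
            rw [pv_ok_iff]
            rintro ⟨hm, -, -⟩
            exact hnm hm
          rw [if_neg hp1, if_pos hp2, if_neg hok]
          have hb : pvBal cs i - 1 = pvBal cs (i + 1) := by
            rw [pv_bal_succ hlt, if_neg hp1, if_pos hp2]
            ring
          rw [hb, pv_slice_snoc hlt hs]
          exact ih (i + 1) s terms (by omega) (by omega) (by omega)
        · by_cases hc : pvBal cs i = 0 ∧ PySem.Chars.upper ((cs.drop i).take 4) = " OR ".toList ∧ 0 < i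
          · obtain ⟨hb0, hmA, hipos⟩ := hc
            have hmB : ((PySem.Chars.upper cs).drop i).take 4 = " OR ".toList := by
              rw [← pv_upper_slice]
              exact hmA
            have hok : pvOk cs i = true := (pv_ok_iff cs i).mpr ⟨hmB, hb0, hipos⟩
            rw [if_neg hp1, if_neg hp2, if_pos ⟨hb0, hmA, hipos⟩, if_pos hok]
            have h4 : i + 4 ≤ cs.length := pv_match_len hmB
            have hbal4 : pvBal cs i = pvBal cs (i + 4) := by
              rw [pv_bal_skip hmB]
            have hnil : ([] : List Char) = (cs.take (i + 4)).drop (i + 4) := by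
              rw [List.drop_eq_nil_of_le (by simp)]
            rw [hbal4, hnil]
            rw [ih (i + 4) (i + 4) _ (by omega) (by omega) h4]
            rw [pv_pieces_cons]
            simp [pvStrip]
          · have hok : ¬ pvOk cs i = true := by
              rw [pv_ok_iff]
              rintro ⟨hm, hb, hp⟩
              exact hc ⟨hb, by rw [pv_upper_slice]; exact hm, hp⟩
            rw [if_neg hp1, if_neg hp2, if_neg hc, if_neg hok]
            have hb : pvBal cs i = pvBal cs (i + 1) := by
              rw [pv_bal_succ hlt, if_neg hp1, if_neg hp2]
              ring
            rw [hb, pv_slice_snoc hlt hs]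
            exact ih (i + 1) s terms (by omega) (by omega) (by omega)
    · exact pv_aloop_base (by omega) _ s terms

theorem pv_foldl_step (l : List Nat) :
    ∀ acc : List Nat, l.foldl pvBStep acc = acc ++ pvPick (pvCursor acc) l := by
  induction l with
  | nil =>
    intro acc
    simp [pvPick]
  | cons x xs ih =>
    intro acc
    rw [List.foldl_cons, ih (pvBStep acc x)]
    cases hL : acc.getLast? with
    | none =>
      have hstep : pvBStep acc x = acc ++ [x] := by
        unfold pvBStep
        rw [hL]
      have hcur : pvCursor acc = 0 := by
        unfold pvCursor
        rw [hL]
      have hcur' : pvCursor (acc ++ [x]) = x + 4 := by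
        unfold pvCursor
        simp
      rw [hstep, hcur, hcur', pv_pick_cons, if_pos (Nat.zero_le x)]
      simp
    | some v =>
      have hcur : pvCursor acc = v + 4 := by
        unfold pvCursor
        rw [hL]
      by_cases hx : v + 4 ≤ x
      · have hstep : pvBStep acc x = acc ++ [x] := by
          unfold pvBStep
          rw [hL]
          simp [hx]
        have hcur' : pvCursor (acc ++ [x]) = x + 4 := by
          unfold pvCursor
          simp
        rw [hstep, hcur, hcur', pv_pick_cons, if_pos hx]
        simp
      · have hstep : pvBStep acc x = acc := by
          unfold pvBStep
          rw [hL]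
          simp [hx]
        rw [hstep, hcur, pv_pick_cons, if_neg hx]

theorem pv_pvF_nil {cs : List Char} {i : Nat} (h : cs.length ≤ i) : pvF cs i = [] := by
  simp [pvF, Nat.sub_eq_zero_of_le h]

theorem pv_pvF_cons {cs : List Char} {i : Nat} (h : i < cs.length) :
    pvF cs i = (if pvOk cs i then [i] else []) ++ pvF cs (i + 1) := by
  unfold pvF
  have hs : cs.length - i = (cs.length - (i + 1)) + 1 := by omega
  rw [hs, List.range'_succ, List.filter_cons]
  cases pvOk cs i <;> simp

theorem pv_pick_skip (cs : List Char) :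
    ∀ (d i j : Nat), j - i ≤ d → i ≤ j →
    pvPick j (pvF cs i) = pvPick j (pvF cs j) := by
  intro d
  induction d with
  | zero =>
    intro i j hd hij
    have : i = j := by omega
    rw [this]
  | succ d ih =>
    intro i j hd hij
    by_cases heq : i = j
    · rw [heq]
    · have hij' : i < j := by omega
      by_cases hn : i < cs.length
      · rw [pv_pvF_cons hn]
        by_cases hok : pvOk cs i = true
        · rw [if_pos hok, List.singleton_append, pv_pick_cons, if_neg (by omega : ¬ j ≤ i)]
          exact ih (i + 1) j (by omega) (by omega)
        · rw [if_neg hok, List.nil_append]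
          exact ih (i + 1) j (by omega) (by omega)
      · rw [pv_pvF_nil (by omega), pv_pvF_nil (by omega)]

theorem pv_pick_eq_g (cs : List Char) :
    ∀ (fuel c i : Nat), cs.length - i ≤ fuel → c ≤ i →
    pvPick c (pvF cs i) = pvG cs i := by
  intro fuel
  induction fuel with
  | zero =>
    intro c i hf hc
    rw [pv_pvF_nil (by omega), pvG, if_neg (by omega)]
    rfl
  | succ fuel ih =>
    intro c i hf hc
    by_cases hn : i < cs.length
    · rw [pv_pvF_cons hn, pvG, if_pos hn]
      by_cases hok : pvOk cs i = true
      · rw [if_pos hok, if_pos hok, List.singleton_append, pv_pick_cons, if_pos hc,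
          pv_pick_skip cs 3 (i + 1) (i + 4) (by omega) (by omega),
          ih (i + 4) (i + 4) (by omega) (le_refl _)]
      · rw [if_neg hok, if_neg hok, List.nil_append]
        exact ih c (i + 1) (by omega) (by omega)
    · rw [pv_pvF_nil (by omega), pvG, if_neg hn]
      rfl

theorem pv_g_le (cs : List Char) :
    ∀ (fuel i : Nat), cs.length - i ≤ fuel → ∀ k ∈ pvG cs i, k + 4 ≤ cs.length := by
  intro fuel
  induction fuel with
  | zero =>
    intro i hf k hk
    rw [pvG, if_neg (by omega : ¬ i < cs.length)] at hk
    exact absurd hk List.not_mem_nil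
  | succ fuel ih =>
    intro i hf k hk
    by_cases hn : i < cs.length
    · rw [pvG, if_pos hn] at hk
      by_cases hok : pvOk cs i = true
      · rw [if_pos hok, List.mem_cons] at hk
        rcases hk with hk | hk
        · rw [hk]
          exact pv_match_len ((pv_ok_iff cs i).mp hok).1
        · exact ih (i + 4) (by omega) k hk
      · rw [if_neg hok] at hk
        exact ih (i + 1) (by omega) k hk
    · rw [pvG, if_neg hn] at hk
      exact absurd hk List.not_mem_nil

theorem pv_ite_cons {c : Prop} [Decidable c] (x : String) (t : List String) (ht : t ≠ []) :
    (if c then (x :: t).dropLast else x :: t) = x :: (if c then t.dropLast else t) := by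
  split_ifs
  · rw [List.dropLast_cons_of_ne_nil ht]
  · rfl

theorem pv_assemble_eq (cs : List Char) :
    ∀ (l : List Nat) (s : Nat), s ≤ cs.length → (∀ k ∈ l, k + 4 ≤ cs.length) →
    (if (s :: l.map (· + 4)).getLast? = some cs.length
     then (((s :: l.map (· + 4)).zip (l ++ [cs.length])).map
            (fun se => String.mk (PySem.Chars.strip ((cs.take se.2).drop se.1)))).dropLast
     else (((s :: l.map (· + 4)).zip (l ++ [cs.length])).map
            (fun se => String.mk (PySem.Chars.strip ((cs.take se.2).drop se.1)))))
    = pvPieces cs s l := by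
  intro l
  induction l with
  | nil =>
    intro s hs _
    have hl : ([s] : List Nat).getLast? = some s := rfl
    simp only [List.map_nil, List.nil_append, List.zip_cons_cons, List.zip_nil_right,
      List.map_cons, List.map_nil]
    by_cases hsn : s = cs.length
    · rw [if_pos (by rw [hl, hsn])]
      rw [pv_pieces_nil, hsn]
      simp
    · rw [if_neg (by rw [hl]; simpa using hsn)]
      rw [pv_pieces_nil, List.take_length]
      have hne : cs.drop s ≠ [] := by
        intro h0
        have := congrArg List.length h0
        simp at this
        omega
      rw [if_pos hne]
      simp [pvStrip]
  | cons k ks ih =>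
    intro s hs hl
    have hk4 : k + 4 ≤ cs.length := hl k List.mem_cons_self
    simp only [List.map_cons, List.cons_append, List.zip_cons_cons, List.map_cons,
      List.getLast?_cons_cons]
    have htail_ne : ((((k + 4) :: ks.map (· + 4)).zip (ks ++ [cs.length])).map
        (fun se => String.mk (PySem.Chars.strip ((cs.take se.2).drop se.1)))) ≠ [] := by
      apply List.ne_nil_of_length_pos
      simp [List.length_zip]
    rw [pv_ite_cons _ _ htail_ne]
    rw [ih (k + 4) hk4 (fun k' hk' => hl k' (List.mem_cons_of_mem _ hk'))]
    rw [pv_pieces_cons]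
    simp [pvStrip]

-- ===== VERDICT (by name: the statement is the Claim_ definition above) =====
theorem split_or_terms_py_spec : Claim_equal_split_or_terms_py := by
  intro line _
  unfold Spec_split_or_terms_py split_or_terms_py
  simp only [split_or_terms_py_alt]
  generalize line.toList = cs
  have hA : pvALoop cs 0 0 [] [] = pvPieces cs 0 (pvG cs 0) := by
    have h0 : (0 : Int) = pvBal cs 0 := by simp [pvBal]
    have hcur : ([] : List Char) = (cs.take 0).drop 0 := rfl
    rw [h0, hcur, pv_aloop_eq cs cs.length 0 0 [] (by omega) (le_refl 0) (by omega)]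
    simp
  rw [hA]
  have hcand : (List.range' 1 (cs.length - 1)).filter
      (fun i => (((PySem.Chars.upper cs).drop i).take 4 == " OR ".toList) && (pvBal cs i == 0))
      = pvF cs 1 := by
    unfold pvF
    apply List.filter_congr
    intro k hk
    have hk1 : 0 < k := by
      rw [List.mem_range'] at hk
      omega
    unfold pvOk
    simp [hk1]
  rw [hcand]
  have hfold : (pvF cs 1).foldl pvBStep [] = pvPick 0 (pvF cs 1) := by
    rw [pv_foldl_step (pvF cs 1) []]
    rfl
  rw [hfold]
  have hg0 : pvPick 0 (pvF cs 1) = pvG cs 0 := by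
    by_cases h0 : 0 < cs.length
    · have hgg : pvG cs 0 = pvG cs 1 := by
        rw [pvG, if_pos h0]
        have hok0 : ¬ pvOk cs 0 = true := by
          rw [pv_ok_iff]
          rintro ⟨-, -, hp⟩
          omega
        rw [if_neg hok0]
      rw [hgg]
      exact pv_pick_eq_g cs cs.length 0 1 (by omega) (by omega)
    · rw [pv_pvF_nil (by omega), pvG, if_neg h0]
      rfl
  rw [hg0]
  exact (pv_assemble_eq cs (pvG cs 0) 0 (by omega) (pv_g_le cs cs.length 0 (by omega))).symm
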